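-- pv_equiv track=rewrite | github.com/zwala/PSets | mid_termPr4.py | satisfiesF
-- ===== SOURCE A (Python) =====
-- def f(s):
--     return 'a' in s
--
-- def satisfiesF(L):
--     #L=['list','of','strings']
--     li=L[:]
--     sum=0
--     for each in li:
--         if f(each)==True:
--             sum+=1
--         else:
--             L.remove(each)
--     return sum
-- ===== SOURCE B (Python) =====
-- def satisfiesF(L):
--     # single-pass in-place compaction with a write index; same return value,
--     # same in-place mutation effect (keep only strings containing 'a')
--     w = 0
--     c = 0
--     for s in L:
--         if 'a' in s:
--             L[w] = s
--             w += 1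
--             c += 1
--     del L[w:]
--     return c
-- ===== Notes on version B (the rewrite author's own statement) =====
-- stated objective: faster
-- what changed: Replaces copy-then-repeated L.remove (each remove rescans the list) by a single forward pass with a write index that compacts L in place and counts matches.
import Mathlib
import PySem

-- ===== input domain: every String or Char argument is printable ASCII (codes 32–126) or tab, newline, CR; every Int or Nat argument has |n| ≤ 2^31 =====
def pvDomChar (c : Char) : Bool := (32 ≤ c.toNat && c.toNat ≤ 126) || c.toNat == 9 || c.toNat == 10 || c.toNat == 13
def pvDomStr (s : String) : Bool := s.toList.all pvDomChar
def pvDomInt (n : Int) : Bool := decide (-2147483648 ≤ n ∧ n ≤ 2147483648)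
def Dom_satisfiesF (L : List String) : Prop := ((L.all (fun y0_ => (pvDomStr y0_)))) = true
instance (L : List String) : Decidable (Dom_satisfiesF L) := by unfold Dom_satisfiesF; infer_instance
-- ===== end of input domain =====

-- B replaces A's copy-then-repeated L.remove by a single pass with a write index
-- (in-place compaction); equivalence proved for the RETURN value (both also perform
-- the same in-place filtering of L, see Source B).


-- ===== PORT A =====
-- def f(s): return 'a' in s
def fA (s : String) : Bool := PySem.Str.isIn "a" s

-- li = L[:]; sum = 0; for each in li: if f(each)==True: sum += 1 else: L.remove(each)
-- state = (current L, sum). L.remove never raises here (each removed value is a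
-- non-'a' string still present, since li is a copy of L), so .getD is never taken.
def satisfiesF (L : List String) : Int :=
  let li := L
  (li.foldl (fun (st : List String × Int) each =>
      if fA each = true then (st.1, st.2 + 1)
      else ((PySem.List.remove? st.1 each).getD st.1, st.2)) (L, 0)).2

-- ===== PORT B =====
-- w/c single pass: acc is the compacted prefix L[0:w] (w = acc.length), c the count.
def satisfiesF_alt (L : List String) : Int :=
  (L.foldl (fun (st : List String × Int) s =>
      if PySem.Str.isIn "a" s then (st.1 ++ [s], st.2 + 1) else st) ([], 0)).2

-- ===== PRECONDITION & SPEC =====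
def Spec_satisfiesF (L : List String) (out : Int) : Prop := out = satisfiesF_alt L
instance (L : List String) (out : Int) : Decidable (Spec_satisfiesF L out) := by unfold Spec_satisfiesF; infer_instance

-- ===== CLAIM (what is proved, stated in full; the proofs are below) =====
def Claim_equal_satisfiesF : Prop := ∀ (L : List String), Dom_satisfiesF L → Spec_satisfiesF L (satisfiesF L)

-- ===== LEMMAS AND PROOFS =====

-- In both folds the Int component only increments on the test, so it equals
-- the initial value plus the count of matching elements, independently of the
-- list component of the state.
theorem sndFoldA (li : List String) : ∀ (st : List String × Int),
    (li.foldl (fun (st : List String × Int) each =>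
      if fA each = true then (st.1, st.2 + 1)
      else ((PySem.List.remove? st.1 each).getD st.1, st.2)) st).2
    = st.2 + (li.countP (fun s => fA s) : Int) := by
  induction li with
  | nil => intro st; simp
  | cons x xs ih =>
    intro st
    rw [List.foldl_cons, List.countP_cons]
    by_cases h : fA x = true
    · rw [if_pos h, ih, if_pos h]; push_cast; ring
    · rw [if_neg h, ih, if_neg h]; push_cast; ring

theorem sndFoldB (li : List String) : ∀ (st : List String × Int),
    (li.foldl (fun (st : List String × Int) s =>
      if PySem.Str.isIn "a" s then (st.1 ++ [s], st.2 + 1) else st) st).2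
    = st.2 + (li.countP (fun s => PySem.Str.isIn "a" s) : Int) := by
  induction li with
  | nil => intro st; simp
  | cons x xs ih =>
    intro st
    rw [List.foldl_cons, List.countP_cons]
    by_cases h : PySem.Str.isIn "a" x = true
    · rw [if_pos h, ih, if_pos h]; push_cast; ring
    · rw [if_neg h, ih, if_neg h]; push_cast; ring

-- ===== VERDICT (by name: the statement is the Claim_ definition above) =====
theorem satisfiesF_spec : Claim_equal_satisfiesF := by
  intro L _
  unfold Spec_satisfiesF satisfiesF satisfiesF_alt
  rw [sndFoldA, sndFoldB]
  simp [fA]
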